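-- pv_equiv track=rewrite | github.com/724thomas/CodingChallenge_Python | baekjoon/1647.py | solution
-- ===== SOURCE A (Python) =====
-- def solution(n, arr):
--     arr.sort(key = lambda x: x[2])
--     par = [i for i in range(n+1)]
--     rank = [0] * (n+1)
--     edges = 0
--     total = 0
--     last = 0
--
--     def find(x):
--         if par[x] != x:
--             par[x] = find(par[x])
--         return par[x]
--
--     def union(a, b):
--         ra = find(a)
--         rb = find(b)
--
--         if (rank[ra] > rank[rb]):
--             par[rb] = ra
--         elif (rank[ra] < rank[rb]):
--             par[ra] = rb
--         else:
--             par[rb] = ra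
--             rank[ra] +=1
--
--     for u, v, d in arr:
--         if find(u) == find(v): continue
--         union(u, v)
--         total += d
--         last = d
--         edges +=1
--         if edges == n-1:
--             break
--
--     return total - last
-- ===== SOURCE B (Python) =====
-- def solution(n, arr):
--     # Kruskal without union-find: a flat component-label list, merged by relabelling.
--     # Mutates arr in place (sorts it by weight) exactly as the original does.
--     arr.sort(key=lambda x: x[2])
--     comp = list(range(n + 1))
--     edges = 0
--     total = 0
--     last = 0
--     for u, v, d in arr:
--         cu = comp[u]
--         cv = comp[v]
--         if cu == cv:
--             continue
--         comp = [cu if c == cv else c for c in comp]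
--         total += d
--         last = d
--         edges += 1
--         if edges == n - 1:
--             break
--     return total - last
-- ===== Notes on version B (the rewrite author's own statement) =====
-- stated objective: alternative
-- what changed: Kruskal's accept/reject loop is kept, but the recursive union-find (path compression + union by rank) is replaced by a flat component-label list: an edge is redundant iff its endpoints carry the same label, and a merge relabels every node of one component in a single comprehension.
-- outside the precondition, e.g. on solution(2, [(0, 1, 1), (9, 9, 5)]): A returns 0, B returns 0
import Mathlib
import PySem

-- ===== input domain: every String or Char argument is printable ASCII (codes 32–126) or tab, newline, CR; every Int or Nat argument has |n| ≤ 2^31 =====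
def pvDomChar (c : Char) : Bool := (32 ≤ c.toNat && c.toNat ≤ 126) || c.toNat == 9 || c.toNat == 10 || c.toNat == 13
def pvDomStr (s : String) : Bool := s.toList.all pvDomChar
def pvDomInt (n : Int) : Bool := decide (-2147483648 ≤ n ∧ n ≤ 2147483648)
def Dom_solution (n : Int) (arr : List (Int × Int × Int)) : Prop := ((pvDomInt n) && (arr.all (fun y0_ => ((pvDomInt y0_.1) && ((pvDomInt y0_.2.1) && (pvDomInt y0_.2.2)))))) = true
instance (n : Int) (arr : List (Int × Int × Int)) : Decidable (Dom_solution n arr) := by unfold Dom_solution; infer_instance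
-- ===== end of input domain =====

-- B replaces A's recursive union-find (path compression + union by rank) by a flat
-- component-label list merged by relabelling (alternative decomposition, similar cost).
-- Both A and B sort `arr` in place by weight; the equivalence proved here is about the
-- return value only (the in-place sort side effect is identical in A and B).


-- ===== PORT A =====
-- `find(x)` with path compression; the fuel argument only makes the recursion structural
-- (under Pre_ it is never exhausted), `none` = IndexError.
def findA : Nat → List Int → Int → Option (Int × List Int)
  | 0, _, _ => none
  | f + 1, par, x =>
    match PySem.List.pyGet? par x with
    | none => none
    | some p =>
      if p = x then some (x, par)
      else
        match findA f par p with
        | none => none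
        | some (r, par') => some (r, PySem.List.pySetD par' x r)

-- `union(a, b)`: two more `find`s, then union by rank.
def unionA (F : Nat) (par rank : List Int) (a b : Int) : List Int × List Int :=
  match findA F par a with
  | none => (par, rank)
  | some (ra, par1) =>
    match findA F par1 b with
    | none => (par1, rank)
    | some (rb, par2) =>
      let ka := PySem.List.pyGetD rank ra 0
      let kb := PySem.List.pyGetD rank rb 0
      if kb < ka then (PySem.List.pySetD par2 rb ra, rank)
      else if ka < kb then (PySem.List.pySetD par2 ra rb, rank)
      else (PySem.List.pySetD par2 rb ra, PySem.List.pySetD rank ra (ka + 1))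

-- the `for u, v, d in arr` loop with `continue` and the `edges == n-1` break
def loopA (n : Int) (F : Nat) : List (Int × Int × Int) → List Int → List Int → Int → Int → Int → Int
  | [], _, _, _, total, last => total - last
  | (u, v, d) :: rest, par, rank, edges, total, last =>
    match findA F par u with
    | none => 0
    | some (ru, par1) =>
      match findA F par1 v with
      | none => 0
      | some (rv, par2) =>
        if ru = rv then loopA n F rest par2 rank edges total last
        else
          let pr := unionA F par2 rank u v
          if edges + 1 = n - 1 then total + d - d
          else loopA n F rest pr.1 pr.2 (edges + 1) (total + d) d

def solution (n : Int) (arr : List (Int × Int × Int)) : Int :=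
  let es := PySem.List.sorted arr (fun x => x.2.2) false
  let par := PySem.List.pyRange 0 (n + 1) 1
  let rank := List.replicate (n + 1).toNat (0 : Int)
  loopA n (par.length + 3) es par rank 0 0 0

-- ===== PORT B =====
-- same accept/reject loop, but connectivity kept as one label per node; a merge
-- relabels the whole list (the comprehension in Source B), `none` = IndexError.
def loopB (n : Int) : List (Int × Int × Int) → List Int → Int → Int → Int → Int
  | [], _, _, total, last => total - last
  | (u, v, d) :: rest, comp, edges, total, last =>
    match PySem.List.pyGet? comp u with
    | none => 0
    | some cu =>
      match PySem.List.pyGet? comp v with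
      | none => 0
      | some cv =>
        if cu = cv then loopB n rest comp edges total last
        else
          let comp' := comp.map (fun c => if c = cv then cu else c)
          if edges + 1 = n - 1 then total + d - d
          else loopB n rest comp' (edges + 1) (total + d) d

def solution_alt (n : Int) (arr : List (Int × Int × Int)) : Int :=
  let es := PySem.List.sorted arr (fun x => x.2.2) false
  loopB n es (PySem.List.pyRange 0 (n + 1) 1) 0 0 0

-- ===== PRECONDITION & SPEC =====
-- Pre_ excludes inputs with an edge endpoint outside the Python index range of the
-- par/comp lists (A raises IndexError there); an out-of-range edge that sorts after the
-- `edges == n-1` break is also excluded although A (and B, identically) still returns.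
def Pre_solution (n : Int) (arr : List (Int × Int × Int)) : Prop :=
  ∀ e ∈ arr, PySem.Raise.InRange (n + 1).toNat e.1 ∧ PySem.Raise.InRange (n + 1).toNat e.2.1
instance (n : Int) (arr : List (Int × Int × Int)) : Decidable (Pre_solution n arr) := by
  unfold Pre_solution; unfold PySem.Raise.InRange; infer_instance

def pvWitness_solution : Int × (List (Int × Int × Int)) :=
  (4, [(1, 2, 3), (0, 1, 1), (2, 3, 7), (3, 4, 2), (0, 4, 5), (1, 3, 4)])

def Spec_solution (n : Int) (arr : List (Int × Int × Int)) (out : Int) : Prop := out = solution_alt n arr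
instance (n : Int) (arr : List (Int × Int × Int)) (out : Int) : Decidable (Spec_solution n arr out) := by unfold Spec_solution; infer_instance

-- ===== CLAIM (what is proved, stated in full; the proofs are below) =====
def Claim_equal_solution : Prop := ∀ (n : Int) (arr : List (Int × Int × Int)), Dom_solution n arr → Pre_solution n arr → Spec_solution n arr (solution n arr)

-- ===== LEMMAS AND PROOFS =====
def canonIx (N : Nat) (x : Int) : Nat := (PySem.List.pyIdx? N x).getD 0

theorem getD_set_self (l : List Int) (i : Nat) (v : Int) (h : i < l.length) : (l.set i v).getD i 0 = v := by
  simp [List.getD, h]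

theorem getD_set_ne (l : List Int) (i j : Nat) (v : Int) (h : j ≠ i) : (l.set i v).getD j 0 = l.getD j 0 := by
  simp [List.getD, List.getElem?_set_ne (by omega : i ≠ j)]

theorem getD_eq_getElem (l : List Int) (i : Nat) (h : i < l.length) : l.getD i 0 = l[i] := by
  simp [List.getD, List.getElem?_eq_getElem h]

theorem set_self_of_getD (l : List Int) (i : Nat) (h : i < l.length) : l.set i (l.getD i 0) = l := by
  rw [getD_eq_getElem l i h]; exact List.set_getElem_self h

theorem pyIdx?_canon (N : Nat) (x : Int) (h : PySem.Raise.InRange N x) :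
    PySem.List.pyIdx? N x = some (canonIx N x) ∧ canonIx N x < N := by
  obtain ⟨h1, h2⟩ := h
  unfold canonIx PySem.List.pyIdx?
  split_ifs <;> simp <;> omega

theorem pyGet?_canon (xs : List Int) (x : Int) (h : PySem.Raise.InRange xs.length x) :
    PySem.List.pyGet? xs x = some (xs.getD (canonIx xs.length x) 0) := by
  obtain ⟨hs, hlt⟩ := pyIdx?_canon xs.length x h
  simp [PySem.List.pyGet?, hs, List.getElem?_eq_getElem hlt]

theorem pySetD_canon (xs : List Int) (x v : Int) (h : PySem.Raise.InRange xs.length x) :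
    PySem.List.pySetD xs x v = xs.set (canonIx xs.length x) v := by
  obtain ⟨hs, hlt⟩ := pyIdx?_canon xs.length x h
  simp [PySem.List.pySetD, PySem.List.pySet?, hs]

def prootF : Nat → List Int → Nat → Option Nat
  | 0, _, _ => none
  | f + 1, par, i =>
    let p := (par.getD i 0).toNat
    if p = i then some i else prootF f par p

def UF (N : Nat) (par rank : List Int) : Prop :=
  par.length = N ∧ rank.length = N ∧
  (∀ i, i < N → 0 ≤ par.getD i 0 ∧ (par.getD i 0).toNat < N) ∧
  (∀ i, i < N → (par.getD i 0).toNat ≠ i → rank.getD i 0 < rank.getD (par.getD i 0).toNat 0)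

def mUF (N : Nat) (rank : List Int) (i : Nat) : Nat :=
  N - ((Finset.range N).filter (fun j => rank.getD j 0 < rank.getD i 0)).card

def rootD (N : Nat) (par : List Int) (i : Nat) : Nat := (prootF (N + 1) par i).getD i

theorem prootF_succ (f : Nat) (par : List Int) (i : Nat) :
    prootF (f + 1) par i =
      if (par.getD i 0).toNat = i then some i else prootF f par ((par.getD i 0).toNat) := rfl

theorem mUF_le (N : Nat) (rank : List Int) (i : Nat) : mUF N rank i ≤ N := Nat.sub_le _ _

theorem mUF_parent_lt (N : Nat) (par rank : List Int) (h : UF N par rank) (i : Nat)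
    (hi : i < N) (hne : (par.getD i 0).toNat ≠ i) :
    mUF N rank ((par.getD i 0).toNat) < mUF N rank i := by
  obtain ⟨-, -, hb, hr⟩ := h
  have hKi := hr i hi hne
  have hcard : (((Finset.range N).filter (fun j => rank.getD j 0 < rank.getD i 0)).card <
      ((Finset.range N).filter (fun j => rank.getD j 0 < rank.getD ((par.getD i 0).toNat) 0)).card) := by
    apply Finset.card_lt_card
    constructor
    · intro j hj
      simp only [Finset.mem_filter, Finset.mem_range] at *
      exact ⟨hj.1, lt_trans hj.2 hKi⟩
    · intro hsub
      have := hsub (Finset.mem_filter.mpr ⟨Finset.mem_range.mpr hi, hKi⟩)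
      simp only [Finset.mem_filter] at this
      exact absurd this.2 (lt_irrefl _)
  have h1 : (((Finset.range N).filter (fun j => rank.getD j 0 < rank.getD ((par.getD i 0).toNat) 0)).card ≤ N) := by
    calc _ ≤ (Finset.range N).card := Finset.card_filter_le _ _
    _ = N := Finset.card_range N
  unfold mUF
  omega

theorem proot_ok (N : Nat) (par rank : List Int) (h : UF N par rank) :
    ∀ f i, i < N → mUF N rank i < f →
      ∃ r, prootF f par i = some r ∧ r < N ∧ (par.getD r 0).toNat = r ∧
        (r ≠ i → rank.getD i 0 < rank.getD r 0) := by
  intro f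
  induction f with
  | zero => intro i _ hf; omega
  | succ f ih =>
    intro i hi hf
    by_cases hp : (par.getD i 0).toNat = i
    · exact ⟨i, by rw [prootF_succ, if_pos hp], hi, hp, by tauto⟩
    · have hpl : (par.getD i 0).toNat < N := (h.2.2.1 i hi).2
      have hm := mUF_parent_lt N par rank h i hi hp
      obtain ⟨r, hpr, hrN, hroot, hK⟩ := ih ((par.getD i 0).toNat) hpl (by omega)
      refine ⟨r, by rw [prootF_succ, if_neg hp]; exact hpr, hrN, hroot, fun _ => ?_⟩
      have hKi := h.2.2.2 i hi hp
      rcases eq_or_ne r ((par.getD i 0).toNat) with he | he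
      · rw [he]; exact hKi
      · exact lt_trans hKi (hK he)

theorem prootF_mono (par : List Int) :
    ∀ f g i r, prootF f par i = some r → f ≤ g → prootF g par i = some r := by
  intro f
  induction f with
  | zero => intro g i r hr; simp [prootF] at hr
  | succ f ih =>
    intro g i r hr hle
    obtain ⟨g', rfl⟩ : ∃ g', g = g' + 1 := ⟨g - 1, by omega⟩
    simp only [prootF] at hr ⊢
    split_ifs at hr ⊢ with hp
    · exact hr
    · exact ih g' _ r hr (by omega)

theorem rootD_spec (N : Nat) (par rank : List Int) (h : UF N par rank) (i : Nat) (hi : i < N) :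
    prootF (N + 1) par i = some (rootD N par i) ∧ rootD N par i < N ∧
      (par.getD (rootD N par i) 0).toNat = rootD N par i ∧
      (rootD N par i ≠ i → rank.getD i 0 < rank.getD (rootD N par i) 0) := by
  obtain ⟨r, hpr, h1, h2, h3⟩ := proot_ok N par rank h (N + 1) i hi (by have := mUF_le N rank i; omega)
  have : rootD N par i = r := by simp [rootD, hpr]
  rw [this]
  exact ⟨hpr, h1, h2, h3⟩

theorem rootD_fix (N : Nat) (par : List Int) (i : Nat) (hfix : (par.getD i 0).toNat = i) :
    rootD N par i = i := by
  unfold rootD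
  rw [prootF_succ, if_pos hfix]
  rfl

theorem rootD_step (N : Nat) (par rank : List Int) (h : UF N par rank) (i : Nat) (hi : i < N)
    (hne : (par.getD i 0).toNat ≠ i) :
    rootD N par i = rootD N par ((par.getD i 0).toNat) := by
  have hpl : (par.getD i 0).toNat < N := (h.2.2.1 i hi).2
  have hm := mUF_parent_lt N par rank h i hi hne
  obtain ⟨r, hpr, -, -, -⟩ := proot_ok N par rank h N ((par.getD i 0).toNat) hpl
    (by have := mUF_le N rank i; omega)
  have h1 : prootF (N + 1) par i = some r := by
    rw [prootF_succ, if_neg hne]; exact hpr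
  have h2 : prootF (N + 1) par ((par.getD i 0).toNat) = some r := prootF_mono par N _ _ r hpr (by omega)
  unfold rootD
  rw [h1, h2]
  rfl

-- root is a fixpoint of the parent map
theorem parent_fix_of_rootD_eq (N : Nat) (par rank : List Int) (h : UF N par rank) (i : Nat)
    (hi : i < N) (hr : rootD N par i = i) : (par.getD i 0).toNat = i := by
  by_contra hne
  have hpl : (par.getD i 0).toNat < N := (h.2.2.1 i hi).2
  have hKi := h.2.2.2 i hi hne
  have hstep := rootD_step N par rank h i hi hne
  have hspec := rootD_spec N par rank h ((par.getD i 0).toNat) hpl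
  rcases eq_or_ne (rootD N par ((par.getD i 0).toNat)) ((par.getD i 0).toNat) with he | he
  · rw [hstep, he] at hr; omega
  · have := hspec.2.2.2 he
    rw [hstep] at hr
    rw [hr] at this
    omega

theorem UF_set_compress (N : Nat) (par rank : List Int) (h : UF N par rank) (x : Nat) (hx : x < N) :
    UF N (par.set x ((rootD N par x : Nat) : Int)) rank := by
  obtain ⟨hl, hrl, hb, hr⟩ := h
  have hspec := rootD_spec N par rank ⟨hl, hrl, hb, hr⟩ x hx
  have hxlen : x < par.length := by omega
  refine ⟨by simp [hl], hrl, ?_, ?_⟩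
  · intro i hi
    by_cases hix : i = x
    · subst hix
      rw [getD_set_self par i _ hxlen]
      constructor
      · positivity
      · simpa using hspec.2.1
    · rw [getD_set_ne par x i _ hix]
      exact hb i hi
  · intro i hi hne
    by_cases hix : i = x
    · subst hix
      rw [getD_set_self par i _ hxlen] at hne ⊢
      have hwne : rootD N par i ≠ i := by simpa using hne
      simpa using hspec.2.2.2 hwne
    · rw [getD_set_ne par x i _ hix] at hne ⊢
      exact hr i hi hne

theorem rootD_redirect (N : Nat) (par rank rank2 : List Int) (h : UF N par rank) (x : Nat)
    (hx : x < N) (hne : rootD N par x ≠ x)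
    (h2 : UF N (par.set x ((rootD N par x : Nat) : Int)) rank2) :
    ∀ j, j < N → rootD N (par.set x ((rootD N par x : Nat) : Int)) j = rootD N par j := by
  have hspec := rootD_spec N par rank h x hx
  have hxlen : x < par.length := by rw [h.1]; exact hx
  have hgx : (par.set x ((rootD N par x : Nat) : Int)).getD x 0 = ((rootD N par x : Nat) : Int) :=
    getD_set_self par x _ hxlen
  have hgne : ∀ j, j ≠ x → (par.set x ((rootD N par x : Nat) : Int)).getD j 0 = par.getD j 0 :=
    fun j hj => getD_set_ne par x j _ hj
  suffices main : ∀ m j, j < N → mUF N rank2 j ≤ m →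
      rootD N (par.set x ((rootD N par x : Nat) : Int)) j = rootD N par j by
    intro j hj
    exact main (mUF N rank2 j) j hj le_rfl
  intro m
  induction m with
  | zero =>
    intro j hj hm
    by_cases hroot' : ((par.set x ((rootD N par x : Nat) : Int)).getD j 0).toNat = j
    · have hj_ne_x : j ≠ x := by
        intro hjx; subst hjx
        rw [hgx] at hroot'
        simp at hroot'
        exact hne hroot'
      rw [rootD_fix N _ j hroot', rootD_fix N par j (by rw [← hgne j hj_ne_x]; exact hroot')]
    · exfalso
      have := mUF_parent_lt N _ rank2 h2 j hj hroot'
      omega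
  | succ m ih =>
    intro j hj hm
    by_cases hroot' : ((par.set x ((rootD N par x : Nat) : Int)).getD j 0).toNat = j
    · have hj_ne_x : j ≠ x := by
        intro hjx; subst hjx
        rw [hgx] at hroot'
        simp at hroot'
        exact hne hroot'
      rw [rootD_fix N _ j hroot', rootD_fix N par j (by rw [← hgne j hj_ne_x]; exact hroot')]
    · have hstep := rootD_step N _ rank2 h2 j hj hroot'
      have hpN : (((par.set x ((rootD N par x : Nat) : Int)).getD j 0).toNat) < N :=
        (h2.2.2.1 j hj).2
      have hmlt := mUF_parent_lt N _ rank2 h2 j hj hroot'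
      rw [hstep, ih _ hpN (by omega)]
      by_cases hjx : j = x
      · subst hjx
        rw [hgx]
        simp only [Int.toNat_natCast]
        exact (rootD_fix N par _ hspec.2.2.1).symm ▸ rfl
      · rw [hgne j hjx]
        exact (rootD_step N par rank h j hj (by rw [← hgne j hjx]; exact hroot')).symm

theorem rootD_merge (N : Nat) (par rank rank2 : List Int) (w l : Nat) (h : UF N par rank)
    (h2 : UF N (par.set l ((w : Nat) : Int)) rank2) (_hwN : w < N) (hlN : l < N)
    (hwfix : (par.getD w 0).toNat = w) (hlfix : (par.getD l 0).toNat = l) (hne : w ≠ l) :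
    ∀ j, j < N → rootD N (par.set l ((w : Nat) : Int)) j =
      if rootD N par j = l then w else rootD N par j := by
  have hllen : l < par.length := by rw [h.1]; exact hlN
  have hgl : (par.set l ((w : Nat) : Int)).getD l 0 = ((w : Nat) : Int) :=
    getD_set_self par l _ hllen
  have hgne : ∀ j, j ≠ l → (par.set l ((w : Nat) : Int)).getD j 0 = par.getD j 0 :=
    fun j hj => getD_set_ne par l j _ hj
  suffices main : ∀ m j, j < N → mUF N rank2 j ≤ m →
      rootD N (par.set l ((w : Nat) : Int)) j = if rootD N par j = l then w else rootD N par j by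
    intro j hj
    exact main (mUF N rank2 j) j hj le_rfl
  have hwfix' : ((par.set l ((w : Nat) : Int)).getD w 0).toNat = w := by
    rw [hgne w hne]; exact hwfix
  intro m
  induction m with
  | zero =>
    intro j hj hm
    by_cases hroot' : ((par.set l ((w : Nat) : Int)).getD j 0).toNat = j
    · by_cases hjl : j = l
      · subst hjl
        rw [hgl] at hroot'
        simp at hroot'
        exact absurd hroot' hne
      · rw [rootD_fix N _ j hroot', rootD_fix N par j (by rw [← hgne j hjl]; exact hroot'),
          if_neg (by simpa using fun hlj => hjl hlj)]
    · exfalso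
      have := mUF_parent_lt N _ rank2 h2 j hj hroot'
      omega
  | succ m ih =>
    intro j hj hm
    by_cases hroot' : ((par.set l ((w : Nat) : Int)).getD j 0).toNat = j
    · by_cases hjl : j = l
      · subst hjl
        rw [hgl] at hroot'
        simp at hroot'
        exact absurd hroot' hne
      · rw [rootD_fix N _ j hroot', rootD_fix N par j (by rw [← hgne j hjl]; exact hroot'),
          if_neg (by simpa using fun hlj => hjl hlj)]
    · have hstep := rootD_step N _ rank2 h2 j hj hroot'
      have hpN : (((par.set l ((w : Nat) : Int)).getD j 0).toNat) < N := (h2.2.2.1 j hj).2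
      have hmlt := mUF_parent_lt N _ rank2 h2 j hj hroot'
      rw [hstep, ih _ hpN (by omega)]
      by_cases hjl : j = l
      · subst hjl
        rw [hgl]
        simp only [Int.toNat_natCast]
        rw [rootD_fix N par w hwfix, if_neg (fun hwl => hne hwl),
          rootD_fix N par _ hlfix, if_pos rfl]
      · rw [hgne j hjl]
        rw [← rootD_step N par rank h j hj (by rw [← hgne j hjl]; exact hroot')]

theorem UF_union_lt (N : Nat) (par rank : List Int) (w l : Nat) (h : UF N par rank)
    (hwN : w < N) (hlN : l < N) (hlfix : (par.getD l 0).toNat = l) (hne : w ≠ l)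
    (hK : rank.getD l 0 < rank.getD w 0) :
    UF N (par.set l ((w : Nat) : Int)) rank := by
  obtain ⟨hl, hrl, hb, hr⟩ := h
  have hllen : l < par.length := by omega
  refine ⟨by simp [hl], hrl, ?_, ?_⟩
  · intro i hi
    by_cases hil : i = l
    · subst hil
      rw [getD_set_self par i _ hllen]
      exact ⟨by positivity, by simpa using hwN⟩
    · rw [getD_set_ne par l i _ hil]
      exact hb i hi
  · intro i hi hnei
    by_cases hil : i = l
    · subst hil
      rw [getD_set_self par i _ hllen] at hnei ⊢
      simpa using hK
    · rw [getD_set_ne par l i _ hil] at hnei ⊢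
      exact hr i hi hnei

theorem UF_union_eq (N : Nat) (par rank : List Int) (w l : Nat) (h : UF N par rank)
    (hwN : w < N) (hlN : l < N) (hwfix : (par.getD w 0).toNat = w)
    (hlfix : (par.getD l 0).toNat = l) (hne : w ≠ l)
    (hK : rank.getD l 0 = rank.getD w 0) :
    UF N (par.set l ((w : Nat) : Int)) (rank.set w (rank.getD w 0 + 1)) := by
  obtain ⟨hl, hrl, hb, hr⟩ := h
  have hllen : l < par.length := by omega
  have hwlen : w < rank.length := by omega
  refine ⟨by simp [hl], by simp [hrl], ?_, ?_⟩
  · intro i hi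
    by_cases hil : i = l
    · subst hil
      rw [getD_set_self par i _ hllen]
      exact ⟨by positivity, by simpa using hwN⟩
    · rw [getD_set_ne par l i _ hil]
      exact hb i hi
  · intro i hi hnei
    by_cases hil : i = l
    · subst hil
      rw [getD_set_self par i _ hllen] at hnei ⊢
      simp only [Int.toNat_natCast]
      rw [getD_set_ne rank w i _ (fun hiw => hne (hiw.symm ▸ rfl)),
        getD_set_self rank w _ hwlen]
      omega
    · rw [getD_set_ne par l i _ hil] at hnei ⊢
      have hKiq := hr i hi hnei
      by_cases hiw : i = w
      · subst hiw
        exact absurd hwfix hnei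
      · rw [getD_set_ne rank w i _ hiw]
        by_cases hpw : (par.getD i 0).toNat = w
        · rw [hpw, getD_set_self rank w _ hwlen]
          rw [hpw] at hKiq
          omega
        · rw [getD_set_ne rank w _ _ hpw]
          exact hKiq


theorem findA_eq (f : Nat) (par : List Int) (x p : Int)
    (hget : PySem.List.pyGet? par x = some p) :
    findA (f + 1) par x =
      if p = x then some (x, par)
      else
        match findA f par p with
        | none => none
        | some (r, par') => some (r, PySem.List.pySetD par' x r) := by
  simp only [findA, hget]

theorem findA_ok (N : Nat) (rank : List Int) :
    ∀ f (par : List Int), UF N par rank → ∀ i, i < N → mUF N rank i < f →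
      ∃ par', findA f par (i : Int) = some (((rootD N par i : Nat) : Int), par') ∧
        UF N par' rank ∧ ∀ j, j < N → rootD N par' j = rootD N par j := by
  intro f
  induction f with
  | zero => intro par h i hi hf; exact absurd hf (Nat.not_lt_zero _)
  | succ f ih =>
    intro par h i hi hf
    have hilen : i < par.length := h.1 ▸ hi
    have hget : PySem.List.pyGet? par (i : Int) = some (par.getD i 0) := by
      rw [PySem.List.pyGet?_natCast, List.getElem?_eq_getElem hilen,
        getD_eq_getElem par i hilen]
    rw [findA_eq f par (i : Int) _ hget]
    by_cases hp : par.getD i 0 = (i : Int)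
    · have hfix : (par.getD i 0).toNat = i := by rw [hp]; simp
      rw [if_pos hp, rootD_fix N par i hfix]
      exact ⟨par, rfl, h, fun j _ => rfl⟩
    · have h0 : 0 ≤ par.getD i 0 := (h.2.2.1 i hi).1
      have hcast : par.getD i 0 = (((par.getD i 0).toNat : Nat) : Int) :=
        (Int.toNat_of_nonneg h0).symm
      have hfixne : (par.getD i 0).toNat ≠ i := by
        intro hc
        exact hp (by rw [hcast, hc])
      have hpN : (par.getD i 0).toNat < N := (h.2.2.1 i hi).2
      have hm := mUF_parent_lt N par rank h i hi hfixne
      obtain ⟨par1, hfind1, hUF1, hroots1⟩ := ih par h ((par.getD i 0).toNat) hpN (by omega)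
      rw [if_neg hp, hcast, hfind1]
      dsimp only
      have hrstep := rootD_step N par rank h i hi hfixne
      have hr1 : rootD N par1 i = rootD N par i := hroots1 i hi
      have hrne : rootD N par i ≠ i := fun hc =>
        hfixne (parent_fix_of_rootD_eq N par rank h i hi hc)
      have hUF2 := UF_set_compress N par1 rank hUF1 i hi
      have hroots2 := rootD_redirect N par1 rank rank hUF1 i hi (by rw [hr1]; exact hrne) hUF2
      refine ⟨par1.set i ((rootD N par1 i : Nat) : Int), ?_, by rw [hr1] at hUF2 ⊢; exact hUF2, ?_⟩
      · rw [PySem.List.pySetD_natCast, ← hrstep, ← hr1]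
      · intro j hj
        rw [hr1] at hroots2
        rw [hr1, hroots2 j hj]
        exact hroots1 j hj

theorem canonIx_nonneg (N : Nat) (x : Int) (h0 : 0 ≤ x) (hx : PySem.Raise.InRange N x) :
    ((canonIx N x : Nat) : Int) = x := by
  unfold canonIx PySem.List.pyIdx?
  obtain ⟨-, h2⟩ := hx
  rw [if_pos h0, if_pos h2]
  simp [Int.toNat_of_nonneg h0]

theorem findA_ok_int (N : Nat) (par rank : List Int) (h : UF N par rank) (x : Int)
    (hx : PySem.Raise.InRange N x) :
    ∃ par', findA (N + 3) par x = some (((rootD N par (canonIx N x) : Nat) : Int), par') ∧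
      UF N par' rank ∧ ∀ j, j < N → rootD N par' j = rootD N par j := by
  have hcN : canonIx N x < N := (pyIdx?_canon N x hx).2
  rcases le_or_gt 0 x with h0 | h0
  · have hc := canonIx_nonneg N x h0 hx
    obtain ⟨par', h1, h2, h3⟩ := findA_ok N rank (N + 3) par h (canonIx N x) hcN
      (by have := mUF_le N rank (canonIx N x); omega)
    exact ⟨par', by rw [hc] at h1; exact h1, h2, h3⟩
  · -- negative index: one wrap step, then the nonnegative machinery
    set c := canonIx N x with hcdef
    have hclen : c < par.length := by rw [h.1]; exact hcN
    have hxl : PySem.Raise.InRange par.length x := by rw [h.1]; exact hx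
    have hget : PySem.List.pyGet? par x = some (par.getD c 0) := by
      have := pyGet?_canon par x hxl
      rw [this, h.1]
    have hp0 : 0 ≤ par.getD c 0 := (h.2.2.1 c hcN).1
    have hpne : ¬ par.getD c 0 = x := by omega
    have hcast : par.getD c 0 = (((par.getD c 0).toNat : Nat) : Int) :=
      (Int.toNat_of_nonneg hp0).symm
    have hpN : (par.getD c 0).toNat < N := (h.2.2.1 c hcN).2
    obtain ⟨par1, hfind1, hUF1, hroots1⟩ := findA_ok N rank (N + 2) par h ((par.getD c 0).toNat)
      hpN (by have := mUF_le N rank ((par.getD c 0).toNat); omega)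
    have hstep : findA (N + 3) par x =
        some (((rootD N par ((par.getD c 0).toNat) : Nat) : Int),
          PySem.List.pySetD par1 x ((rootD N par ((par.getD c 0).toNat) : Nat) : Int)) := by
      show findA ((N + 2) + 1) par x = _
      rw [findA_eq (N + 2) par x _ hget, if_neg hpne,
        show findA (N + 2) par (par.getD c 0) =
          findA (N + 2) par (((par.getD c 0).toNat : Nat) : Int) from by rw [← hcast],
        hfind1]
    have hrc : rootD N par ((par.getD c 0).toNat) = rootD N par c := by
      by_cases hfix : (par.getD c 0).toNat = c
      · rw [hfix]
      · exact (rootD_step N par rank h c hcN hfix).symm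
    have hsetD : PySem.List.pySetD par1 x ((rootD N par ((par.getD c 0).toNat) : Nat) : Int) =
        par1.set c ((rootD N par ((par.getD c 0).toNat) : Nat) : Int) := by
      have hx1 : PySem.Raise.InRange par1.length x := by rw [hUF1.1]; exact hx
      rw [pySetD_canon par1 x _ hx1]
      congr 1
      rw [hUF1.1]
    rw [hstep, hsetD, hrc]
    have hr1 : rootD N par1 c = rootD N par c := hroots1 c hcN
    by_cases hroot : rootD N par c = c
    · -- c is its own root: the compression write stores the value already there
      have hfix1 : (par1.getD c 0).toNat = c :=
        parent_fix_of_rootD_eq N par1 rank hUF1 c hcN (by rw [hr1, hroot])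
      have hfix1' : par1.getD c 0 = ((c : Nat) : Int) := by
        have := Int.toNat_of_nonneg (hUF1.2.2.1 c hcN).1
        omega
      have hself : par1.set c ((rootD N par c : Nat) : Int) = par1 := by
        rw [hroot, ← hfix1', set_self_of_getD par1 c (by rw [hUF1.1]; exact hcN)]
      rw [hself]
      exact ⟨par1, rfl, hUF1, hroots1⟩
    · have hUF2 := UF_set_compress N par1 rank hUF1 c hcN
      have hroots2 := rootD_redirect N par1 rank rank hUF1 c hcN (by rw [hr1]; exact hroot) hUF2
      rw [← hr1]
      refine ⟨par1.set c ((rootD N par1 c : Nat) : Int), rfl, hUF2, ?_⟩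
      intro j hj
      rw [hroots2 j hj]
      exact hroots1 j hj


theorem unionA_ok (N : Nat) (par rank : List Int) (h : UF N par rank) (a b : Int)
    (ha : PySem.Raise.InRange N a) (hb : PySem.Raise.InRange N b)
    (hne : rootD N par (canonIx N a) ≠ rootD N par (canonIx N b)) :
    ∃ w l, ((w = rootD N par (canonIx N a) ∧ l = rootD N par (canonIx N b)) ∨
            (w = rootD N par (canonIx N b) ∧ l = rootD N par (canonIx N a))) ∧
      UF N (unionA (N + 3) par rank a b).1 (unionA (N + 3) par rank a b).2 ∧
      ∀ j, j < N → rootD N (unionA (N + 3) par rank a b).1 j =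
        if rootD N par j = l then w else rootD N par j := by
  set ra := rootD N par (canonIx N a) with hradef
  set rb := rootD N par (canonIx N b) with hrbdef
  have hcaN : canonIx N a < N := (pyIdx?_canon N a ha).2
  have hcbN : canonIx N b < N := (pyIdx?_canon N b hb).2
  have hraN : ra < N := (rootD_spec N par rank h _ hcaN).2.1
  have hrbN : rb < N := (rootD_spec N par rank h _ hcbN).2.1
  have hra_fix : (par.getD ra 0).toNat = ra := (rootD_spec N par rank h _ hcaN).2.2.1
  have hrb_fix : (par.getD rb 0).toNat = rb := (rootD_spec N par rank h _ hcbN).2.2.1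
  obtain ⟨par1, hf1, hUF1, hr1⟩ := findA_ok_int N par rank h a ha
  obtain ⟨par2, hf2, hUF2, hr2⟩ := findA_ok_int N par1 rank hUF1 b hb
  have hf2' : findA (N + 3) par1 b = some (((rb : Nat) : Int), par2) := by
    rw [hf2, hr1 _ hcbN]
  have hr12 : ∀ j, j < N → rootD N par2 j = rootD N par j := fun j hj => by
    rw [hr2 j hj, hr1 j hj]
  have hroot2a : rootD N par2 ra = ra := by
    rw [hr12 ra hraN]; exact rootD_fix N par ra hra_fix
  have hroot2b : rootD N par2 rb = rb := by
    rw [hr12 rb hrbN]; exact rootD_fix N par rb hrb_fix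
  have hfix2a : (par2.getD ra 0).toNat = ra :=
    parent_fix_of_rootD_eq N par2 rank hUF2 ra hraN hroot2a
  have hfix2b : (par2.getD rb 0).toNat = rb :=
    parent_fix_of_rootD_eq N par2 rank hUF2 rb hrbN hroot2b
  have hmerge : ∀ (w l : Nat), w < N → l < N →
      (par2.getD w 0).toNat = w → (par2.getD l 0).toNat = l → w ≠ l →
      ∀ rank2, UF N (par2.set l ((w : Nat) : Int)) rank2 →
      ∀ j, j < N → rootD N (par2.set l ((w : Nat) : Int)) j =
        if rootD N par j = l then w else rootD N par j := by
    intro w l hwN hlN hwf hlf hwl rank2 hUFn j hj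
    have := rootD_merge N par2 rank rank2 w l hUF2 hUFn hwN hlN hwf hlf hwl j hj
    rw [this, hr12 j hj]
  rcases lt_trichotomy (rank.getD rb 0) (rank.getD ra 0) with hK | hK | hK
  · have hu : unionA (N + 3) par rank a b = (par2.set rb ((ra : Nat) : Int), rank) := by
      unfold unionA
      rw [hf1]
      dsimp only
      rw [hf2']
      dsimp only
      simp only [PySem.List.pyGetD_natCast]
      rw [if_pos (by simpa using hK), PySem.List.pySetD_natCast]
    have hUFn : UF N (par2.set rb ((ra : Nat) : Int)) rank :=
      UF_union_lt N par2 rank ra rb hUF2 hraN hrbN hfix2b (fun hc => hne hc) hK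
    refine ⟨ra, rb, Or.inl ⟨rfl, rfl⟩, ?_, ?_⟩
    · rw [hu]; exact hUFn
    · rw [hu]
      exact hmerge ra rb hraN hrbN hfix2a hfix2b (fun hc => hne hc) rank hUFn
  · have hu : unionA (N + 3) par rank a b =
        (par2.set rb ((ra : Nat) : Int), rank.set ra (rank.getD ra 0 + 1)) := by
      unfold unionA
      rw [hf1]
      dsimp only
      rw [hf2']
      dsimp only
      simp only [PySem.List.pyGetD_natCast]
      rw [if_neg (by simpa using not_lt.mpr (le_of_eq hK.symm)),
        if_neg (by simpa using not_lt.mpr (le_of_eq hK)), PySem.List.pySetD_natCast,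
        PySem.List.pySetD_natCast]
    have hUFn : UF N (par2.set rb ((ra : Nat) : Int)) (rank.set ra (rank.getD ra 0 + 1)) :=
      UF_union_eq N par2 rank ra rb hUF2 hraN hrbN hfix2a hfix2b (fun hc => hne hc) hK
    refine ⟨ra, rb, Or.inl ⟨rfl, rfl⟩, ?_, ?_⟩
    · rw [hu]; exact hUFn
    · rw [hu]
      exact hmerge ra rb hraN hrbN hfix2a hfix2b (fun hc => hne hc) _ hUFn
  · have hu : unionA (N + 3) par rank a b = (par2.set ra ((rb : Nat) : Int), rank) := by
      unfold unionA
      rw [hf1]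
      dsimp only
      rw [hf2']
      dsimp only
      simp only [PySem.List.pyGetD_natCast]
      rw [if_neg (by simpa using not_lt.mpr (le_of_lt hK)), if_pos (by simpa using hK),
        PySem.List.pySetD_natCast]
    have hUFn : UF N (par2.set ra ((rb : Nat) : Int)) rank :=
      UF_union_lt N par2 rank rb ra hUF2 hrbN hraN hfix2a (fun hc => hne hc.symm) hK
    refine ⟨rb, ra, Or.inr ⟨rfl, rfl⟩, ?_, ?_⟩
    · rw [hu]; exact hUFn
    · rw [hu]
      exact hmerge rb ra hrbN hraN hfix2b hfix2a (fun hc => hne hc.symm) rank hUFn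

theorem relabel_iff (w l rj rk : Nat) (cu cv cj ck : Int)
    (_hwl : w ≠ l) (hcuv : cu ≠ cv)
    (hbase : rj = rk ↔ cj = ck)
    (hjw : rj = w ∨ rj = l ↔ cj = cu ∨ cj = cv)
    (hkw : rk = w ∨ rk = l ↔ ck = cu ∨ ck = cv) :
    ((if rj = l then w else rj) = (if rk = l then w else rk)) ↔
      ((if cj = cv then cu else cj) = (if ck = cv then cu else ck)) := by
  have hg_mem : ∀ c : Int, c = cu ∨ c = cv → (if c = cv then cu else c) = cu := by
    intro c hc
    rcases hc with rfl | rfl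
    · rw [if_neg hcuv]
    · rw [if_pos rfl]
  have hmem_g : ∀ c : Int, (if c = cv then cu else c) = cu → c = cu ∨ c = cv := by
    intro c hc
    by_cases hcv : c = cv
    · right; exact hcv
    · rw [if_neg hcv] at hc; left; exact hc
  by_cases hjl : rj = l <;> by_cases hkl : rk = l
  · rw [if_pos hjl, if_pos hkl, hg_mem cj (hjw.mp (Or.inr hjl)), hg_mem ck (hkw.mp (Or.inr hkl))]
    simp
  · rw [if_pos hjl, if_neg hkl, hg_mem cj (hjw.mp (Or.inr hjl))]
    constructor
    · intro hyp
      exact (hg_mem ck (hkw.mp (Or.inl hyp.symm))).symm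
    · intro hyp
      rcases hkw.mpr (hmem_g ck hyp.symm) with hw | hl
      · exact hw.symm
      · exact absurd hl hkl
  · rw [if_neg hjl, if_pos hkl, hg_mem ck (hkw.mp (Or.inr hkl))]
    constructor
    · intro hyp
      exact hg_mem cj (hjw.mp (Or.inl hyp))
    · intro hyp
      rcases hjw.mpr (hmem_g cj hyp) with hw | hl
      · exact hw
      · exact absurd hl hjl
  · rw [if_neg hjl, if_neg hkl]
    constructor
    · intro hyp
      rw [hbase.mp hyp]
    · intro hyp
      by_cases hjv : cj = cv
      · rw [if_pos hjv] at hyp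
        rcases hjw.mpr (Or.inr hjv) with hw | hl
        swap
        · exact absurd hl hjl
        rcases hkw.mpr (hmem_g ck hyp.symm) with hw' | hl'
        · rw [hw, hw']
        · exact absurd hl' hkl
      · rw [if_neg hjv] at hyp
        by_cases hkv : ck = cv
        · rw [if_pos hkv] at hyp
          rcases hjw.mpr (Or.inl hyp) with hw | hl
          swap
          · exact absurd hl hjl
          rcases hkw.mpr (Or.inr hkv) with hw' | hl'
          · rw [hw, hw']
          · exact absurd hl' hkl
        · rw [if_neg hkv] at hyp
          exact hbase.mpr hyp



def Corr (N : Nat) (par comp : List Int) : Prop :=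
  ∀ j k, j < N → k < N → (rootD N par j = rootD N par k ↔ comp.getD j 0 = comp.getD k 0)

theorem getD_map_relabel (comp : List Int) (g : Int → Int) (j : Nat) (hj : j < comp.length) :
    (comp.map g).getD j 0 = g (comp.getD j 0) := by
  rw [getD_eq_getElem _ j (by simpa using hj), getD_eq_getElem _ j hj, List.getElem_map]

theorem loop_eq (n : Int) (N : Nat) :
    ∀ (es : List (Int × Int × Int)) (par rank comp : List Int) (edges total last : Int),
      UF N par rank → comp.length = N → Corr N par comp →
      (∀ e ∈ es, PySem.Raise.InRange N e.1 ∧ PySem.Raise.InRange N e.2.1) →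
      loopA n (N + 3) es par rank edges total last = loopB n es comp edges total last := by
  intro es
  induction es with
  | nil => intro par rank comp edges total last _ _ _ _; rfl
  | cons e rest ih =>
    obtain ⟨u, v, d⟩ := e
    intro par rank comp edges total last hUF hlen hCorr hPre
    have hu : PySem.Raise.InRange N u := (hPre (u, v, d) (by simp)).1
    have hv : PySem.Raise.InRange N v := (hPre (u, v, d) (by simp)).2
    have hiuN : canonIx N u < N := (pyIdx?_canon N u hu).2
    have hivN : canonIx N v < N := (pyIdx?_canon N v hv).2
    obtain ⟨par1, hf1, hUF1, hr1⟩ := findA_ok_int N par rank hUF u hu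
    obtain ⟨par2, hf2, hUF2, hr2⟩ := findA_ok_int N par1 rank hUF1 v hv
    have hf2' : findA (N + 3) par1 v = some (((rootD N par (canonIx N v) : Nat) : Int), par2) := by
      rw [hf2, hr1 _ hivN]
    have hr12 : ∀ j, j < N → rootD N par2 j = rootD N par j := fun j hj => by
      rw [hr2 j hj, hr1 j hj]
    have hgetu : PySem.List.pyGet? comp u = some (comp.getD (canonIx N u) 0) := by
      have := pyGet?_canon comp u (by rw [hlen]; exact hu)
      rw [this, hlen]
    have hgetv : PySem.List.pyGet? comp v = some (comp.getD (canonIx N v) 0) := by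
      have := pyGet?_canon comp v (by rw [hlen]; exact hv)
      rw [this, hlen]
    show (match findA (N + 3) par u with
      | none => 0
      | some (ru, par1) =>
        match findA (N + 3) par1 v with
        | none => 0
        | some (rv, par2) =>
          if ru = rv then loopA n (N + 3) rest par2 rank edges total last
          else
            let pr := unionA (N + 3) par2 rank u v
            if edges + 1 = n - 1 then total + d - d
            else loopA n (N + 3) rest pr.1 pr.2 (edges + 1) (total + d) d : Int) = _
    rw [hf1]
    dsimp only
    rw [hf2']
    dsimp only
    show _ = (match PySem.List.pyGet? comp u with
      | none => 0
      | some cu =>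
        match PySem.List.pyGet? comp v with
        | none => 0
        | some cv =>
          if cu = cv then loopB n rest comp edges total last
          else
            let comp' := comp.map (fun c => if c = cv then cu else c)
            if edges + 1 = n - 1 then total + d - d
            else loopB n rest comp' (edges + 1) (total + d) d : Int)
    rw [hgetu]
    dsimp only
    rw [hgetv]
    dsimp only
    have hguard := hCorr (canonIx N u) (canonIx N v) hiuN hivN
    by_cases hg : rootD N par (canonIx N u) = rootD N par (canonIx N v)
    · rw [if_pos (by exact_mod_cast hg), if_pos (hguard.mp hg)]
      refine ih par2 rank comp edges total last hUF2 hlen ?_ (fun e he => hPre e (by simp [he]))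
      intro j k hj hk
      rw [hr12 j hj, hr12 k hk]
      exact hCorr j k hj hk
    · have hcne : ¬ comp.getD (canonIx N u) 0 = comp.getD (canonIx N v) 0 :=
        fun hc => hg (hguard.mpr hc)
      rw [if_neg (fun hc => hg (by exact_mod_cast hc)), if_neg hcne]
      have hne2 : rootD N par2 (canonIx N u) ≠ rootD N par2 (canonIx N v) := by
        rw [hr12 _ hiuN, hr12 _ hivN]; exact hg
      obtain ⟨w, l, hwl_or, hUFn, hrootmap⟩ := unionA_ok N par2 rank hUF2 u v hu hv hne2
      -- root map in terms of the original par
      have hmap : ∀ j, j < N → rootD N (unionA (N + 3) par2 rank u v).1 j =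
          if rootD N par j = l then w else rootD N par j := by
        intro j hj
        rw [hrootmap j hj, hr12 j hj]
      have hwl_or' : (w = rootD N par (canonIx N u) ∧ l = rootD N par (canonIx N v)) ∨
          (w = rootD N par (canonIx N v) ∧ l = rootD N par (canonIx N u)) := by
        rcases hwl_or with ⟨hw, hl⟩ | ⟨hw, hl⟩
        · exact Or.inl ⟨by rw [hw, hr12 _ hiuN], by rw [hl, hr12 _ hivN]⟩
        · exact Or.inr ⟨by rw [hw, hr12 _ hivN], by rw [hl, hr12 _ hiuN]⟩
      by_cases hbreak : edges + 1 = n - 1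
      · rw [if_pos hbreak, if_pos hbreak]
      · rw [if_neg hbreak, if_neg hbreak]
        refine ih _ _ _ _ _ _ hUFn (by simpa using hlen) ?_
          (fun e he => hPre e (by simp [he]))
        -- the new correspondence
        have hwlne : w ≠ l := by
          rcases hwl_or' with ⟨hw, hl⟩ | ⟨hw, hl⟩
          · rw [hw, hl]; exact hg
          · rw [hw, hl]; exact fun hc => hg hc.symm
        intro j k hj hk
        rw [hmap j hj, hmap k hk,
          getD_map_relabel comp _ j (by rw [hlen]; exact hj),
          getD_map_relabel comp _ k (by rw [hlen]; exact hk)]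
        refine relabel_iff w l (rootD N par j) (rootD N par k)
          (comp.getD (canonIx N u) 0) (comp.getD (canonIx N v) 0)
          (comp.getD j 0) (comp.getD k 0) hwlne hcne (hCorr j k hj hk) ?_ ?_
        · rcases hwl_or' with ⟨hw, hl⟩ | ⟨hw, hl⟩
          · rw [hw, hl]
            exact or_congr (hCorr j (canonIx N u) hj hiuN) (hCorr j (canonIx N v) hj hivN)
          · rw [hw, hl]
            rw [or_comm]
            exact (or_congr (hCorr j (canonIx N u) hj hiuN) (hCorr j (canonIx N v) hj hivN))
        · rcases hwl_or' with ⟨hw, hl⟩ | ⟨hw, hl⟩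
          · rw [hw, hl]
            exact or_congr (hCorr k (canonIx N u) hk hiuN) (hCorr k (canonIx N v) hk hivN)
          · rw [hw, hl]
            rw [or_comm]
            exact (or_congr (hCorr k (canonIx N u) hk hiuN) (hCorr k (canonIx N v) hk hivN))

-- ===== VERDICT (by name: the statement is the Claim_ definition above) =====
theorem solution_spec : Claim_equal_solution := by
  intro n arr _ hpre
  unfold Spec_solution solution solution_alt
  dsimp only
  have hlen : (PySem.List.pyRange 0 (n + 1) 1).length = (n + 1).toNat := by
    rw [PySem.List.length_pyRange_one]
    norm_num
  rw [hlen]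
  have hget : ∀ i, i < (n + 1).toNat →
      (PySem.List.pyRange 0 (n + 1) 1).getD i 0 = ((i : Nat) : Int) := by
    intro i hi
    rw [getD_eq_getElem _ i (by rw [hlen]; exact hi), PySem.List.getElem_pyRange_one]
    norm_num
  have hUF0 : UF ((n + 1).toNat) (PySem.List.pyRange 0 (n + 1) 1)
      (List.replicate (n + 1).toNat (0 : Int)) := by
    refine ⟨hlen, List.length_replicate, ?_, ?_⟩
    · intro i hi
      rw [hget i hi]
      exact ⟨by positivity, by simpa using hi⟩
    · intro i hi hne
      rw [hget i hi] at hne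
      simp at hne
  have hCorr0 : Corr ((n + 1).toNat) (PySem.List.pyRange 0 (n + 1) 1)
      (PySem.List.pyRange 0 (n + 1) 1) := by
    intro j k hj hk
    rw [rootD_fix _ _ j (by rw [hget j hj]; simp),
      rootD_fix _ _ k (by rw [hget k hk]; simp), hget j hj, hget k hk]
    constructor
    · intro hyp; rw [hyp]
    · intro hyp; exact_mod_cast hyp
  exact loop_eq n ((n + 1).toNat) (PySem.List.sorted arr (fun x => x.2.2) false)
    (PySem.List.pyRange 0 (n + 1) 1) (List.replicate (n + 1).toNat (0 : Int))
    (PySem.List.pyRange 0 (n + 1) 1) 0 0 0 hUF0 hlen hCorr0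
    (fun e he => hpre e ((PySem.List.mem_sorted arr _ false e).mp he))
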